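-- pv_equiv track=rewrite | github.com/AvianJay/useless-script | discord/AutoReply.py | _find_top_level_token
-- ===== SOURCE A (Python) =====
-- def _find_top_level_token(value: str, token: str):
--     depth = 0
--     for index, char in enumerate(value):
--         if char == "{":
--             depth += 1
--         elif char == "}":
--             depth = max(0, depth - 1)
--         elif depth == 0 and value.startswith(token, index):
--             return index
--     return -1
-- ===== SOURCE B (Python) =====
-- def _find_top_level_token(value: str, token: str):
--     # Precompute the brace depth before each position, then jump between
--     # occurrences of token with str.find instead of testing every index.
--     depth = 0
--     depths = []
--     for ch in value:
--         depths.append(depth)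
--         if ch == "{":
--             depth += 1
--         elif ch == "}":
--             depth = max(0, depth - 1)
--     pos = 0
--     n = len(value)
--     while pos < n:
--         j = value.find(token, pos)
--         if j == -1:
--             return -1
--         if depths[j] == 0 and value[j] not in "{}":
--             return j
--         pos = j + 1
--     return -1
-- ===== Notes on version B (the rewrite author's own statement) =====
-- stated objective: alternative
-- what changed: A fuses depth tracking and token testing into one per-character scan with early return; B first builds the whole clamped-depth table in one pass, then jumps between occurrences of token with str.find, checking only candidate indices against the table.
import Mathlib
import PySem

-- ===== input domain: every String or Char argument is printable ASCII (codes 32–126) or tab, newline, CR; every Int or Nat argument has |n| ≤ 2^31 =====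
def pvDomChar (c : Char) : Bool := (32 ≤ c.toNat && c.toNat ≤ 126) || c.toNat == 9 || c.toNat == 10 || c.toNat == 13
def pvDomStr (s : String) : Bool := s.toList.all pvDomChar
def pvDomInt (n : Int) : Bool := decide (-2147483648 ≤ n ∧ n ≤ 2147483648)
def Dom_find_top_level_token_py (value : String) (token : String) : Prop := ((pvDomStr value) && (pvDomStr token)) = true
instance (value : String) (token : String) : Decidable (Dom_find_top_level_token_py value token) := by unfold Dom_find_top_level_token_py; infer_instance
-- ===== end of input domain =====

-- B replaces A's single fused scan by a precomputed depth table plus str.find jumps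
-- between token occurrences (objective: alternative decomposition; same worst-case cost).

-- ===== PORT A =====
-- A's loop over enumerate(value): the list argument is always the suffix value[index:],
-- so value.startswith(token, index) is exactly startswith on that suffix (0 ≤ index ≤ len).
def findTLgoA (token : List Char) : List Char → Nat → Int → Int
  | [], _, _ => -1
  | c :: rest, index, depth =>
    if c = '{' then findTLgoA token rest (index + 1) (depth + 1)
    else if c = '}' then findTLgoA token rest (index + 1) (max 0 (depth - 1))
    else if depth = 0 ∧ PySem.Chars.startswith (c :: rest) token = true then (index : Int)
    else findTLgoA token rest (index + 1) depth

def find_top_level_token_py (value : String) (token : String) : Int :=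
  findTLgoA token.toList value.toList 0 0

-- ===== PORT B =====
-- first pass of Source B: depths[i] = clamped brace depth before position i
def depthsOf : List Char → Int → List Int
  | [], _ => []
  | c :: rest, d =>
    d :: depthsOf rest (if c = '{' then d + 1 else if c = '}' then max 0 (d - 1) else d)

-- Source B's while loop; fuel n bounds the iterations (pos strictly increases below n)
def goB (value token : List Char) (depths : List Int) (n : Nat) : Nat → Nat → Int
  | _, 0 => -1
  | pos, fuel + 1 =>
    if pos < n then
      let j := PySem.Chars.findFrom value token (pos : Int) none
      if j = -1 then -1
      else if PySem.List.pyGet? depths j = some 0 ∧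
              PySem.List.pyGet? value j ≠ some '{' ∧ PySem.List.pyGet? value j ≠ some '}' then j
      else goB value token depths n (j.toNat + 1) fuel
    else -1

def find_top_level_token_py_alt (value : String) (token : String) : Int :=
  let l := value.toList
  goB l token.toList (depthsOf l 0) l.length 0 l.length

-- ===== PRECONDITION & SPEC =====
def Spec_find_top_level_token_py (value : String) (token : String) (out : Int) : Prop := out = find_top_level_token_py_alt value token
instance (value : String) (token : String) (out : Int) : Decidable (Spec_find_top_level_token_py value token out) := by unfold Spec_find_top_level_token_py; infer_instance

-- ===== CLAIM (what is proved, stated in full; the proofs are below) =====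
def Claim_equal_find_top_level_token_py : Prop := ∀ (value : String) (token : String), Dom_find_top_level_token_py value token → Spec_find_top_level_token_py value token (find_top_level_token_py value token)

-- ===== LEMMAS AND PROOFS =====

-- reference predicate: position i is a hit (depth 0, not a brace, token starts there)
def okAt (value token : List Char) (depths : List Int) (i : Nat) : Bool :=
  decide (depths[i]? = some (0 : Int)) && decide (value[i]? ≠ some '{') &&
    decide (value[i]? ≠ some '}') && PySem.Chars.startswith (value.drop i) token

-- reference scan: first position ≥ pos below n with okAt, else -1
def scanFrom (value token : List Char) (depths : List Int) (n : Nat) (pos : Nat) : Int :=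
  if _h : pos < n then
    (if okAt value token depths pos then (pos : Int) else scanFrom value token depths n (pos + 1))
  else -1
termination_by n - pos
decreasing_by omega

lemma scan_ge (value token : List Char) (depths : List Int) (n pos : Nat) (h : n ≤ pos) :
    scanFrom value token depths n pos = -1 := by
  rw [scanFrom]; simp [Nat.not_lt.mpr h]

lemma lemA (value token : List Char) (depths : List Int) :
    ∀ (rest : List Char) (i : Nat) (d : Int),
      value.drop i = rest → depths.drop i = depthsOf rest d →
      findTLgoA token rest i d = scanFrom value token depths value.length i := by
  intro rest
  induction rest with
  | nil =>
    intro i d hv _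
    have hi : value.length ≤ i := by
      have := congrArg List.length hv; simp at this; omega
    rw [scan_ge _ _ _ _ _ hi]; rfl
  | cons c rest ih =>
    intro i d hv hd
    have hlen : i < value.length := by
      have := congrArg List.length hv; simp at this; omega
    have hvc : value[i]? = some c := by
      have h0 : (value.drop i)[0]? = value[i + 0]? := List.getElem?_drop
      rw [hv] at h0; simpa using h0.symm
    have hdc : depths[i]? = some d := by
      have h0 : (depths.drop i)[0]? = depths[i + 0]? := List.getElem?_drop
      rw [hd] at h0; simpa [depthsOf] using h0.symm
    have hvt : value.drop (i+1) = rest := by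
      rw [← List.tail_drop, hv]; rfl
    have hdt : depths.drop (i+1) = depthsOf rest (if c = '{' then d + 1 else if c = '}' then max 0 (d - 1) else d) := by
      rw [← List.tail_drop, hd]; rfl
    rw [scanFrom]
    simp only [hlen, dif_pos]
    by_cases hb1 : c = '{'
    · have hok : okAt value token depths i = false := by
        simp [okAt, hvc, hb1]
      rw [hok]; simp only [Bool.false_eq_true, if_false]
      rw [findTLgoA]; simp only [hb1, if_pos]
      exact ih (i+1) (d+1) hvt (by simpa [hb1] using hdt)
    · by_cases hb2 : c = '}'
      · have hok : okAt value token depths i = false := by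
          simp [okAt, hvc, hb2]
        rw [hok]; simp only [Bool.false_eq_true, if_false]
        rw [findTLgoA]; simp only [hb1, hb2, if_pos, if_neg, if_false]
        exact ih (i+1) (max 0 (d-1)) hvt (by simpa [hb1, hb2] using hdt)
      · by_cases hhit : d = 0 ∧ PySem.Chars.startswith (c :: rest) token = true
        · have hok : okAt value token depths i = true := by
            simp [okAt, hvc, hdc, hb1, hb2, hv, hhit.1, hhit.2]
          rw [hok]; simp only [if_pos]
          rw [findTLgoA]; simp [hb1, hb2, hhit]
        · have hok : okAt value token depths i = false := by
            by_contra hne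
            have := Bool.not_eq_false _ |>.mp hne
            simp [okAt, hvc, hdc, hv] at this
            exact hhit ⟨this.1.1.1, this.2⟩
          rw [hok]; simp only [Bool.false_eq_true, if_false]
          rw [findTLgoA]; simp only [hb1, hb2, hhit, if_neg, if_false]
          exact ih (i+1) d hvt (by simpa [hb1, hb2] using hdt)

lemma scan_skip (value token : List Char) (depths : List Int) (n : Nat) :
    ∀ (k pos : Nat),
      (∀ i, pos ≤ i → i < pos + k → okAt value token depths i = false) →
      scanFrom value token depths n pos = scanFrom value token depths n (pos + k) := by
  intro k
  induction k with
  | zero => intro pos _; rfl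
  | succ k ih =>
    intro pos hfail
    by_cases hlt : pos < n
    · rw [scanFrom]
      simp only [hlt, dif_pos, hfail pos le_rfl (by omega), Bool.false_eq_true, if_false]
      have := ih (pos + 1) (fun i h1 h2 => hfail i (by omega) (by omega))
      rw [this]; ring_nf
    · rw [scan_ge _ _ _ _ _ (by omega), scan_ge _ _ _ _ _ (by omega)]

lemma prefix_drop_infix {α : Type} (l t : List α) (p i : Nat) (hpi : p ≤ i)
    (h : t <+: l.drop i) : t <:+: l.drop p := by
  have h2 : l.drop i <:+ l.drop p := by
    have he : l.drop i = (l.drop p).drop (i - p) := by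
      rw [List.drop_drop]; congr 1; omega
    rw [he]; exact List.drop_suffix _ _
  exact h.isInfix.trans h2.isInfix

lemma lemB (value token : List Char) (depths : List Int) :
    ∀ (fuel pos : Nat), value.length - pos ≤ fuel →
      goB value token depths value.length pos fuel =
        scanFrom value token depths value.length pos := by
  intro fuel
  induction fuel with
  | zero =>
    intro pos hf
    rw [scan_ge _ _ _ _ _ (by omega)]; rfl
  | succ fuel ih =>
    intro pos hf
    by_cases hlt : pos < value.length
    · rw [goB]
      simp only [hlt, if_pos]
      have hk : pos ≤ value.length := by omega
      rw [PySem.Chars.findFrom_natCast value token pos hk]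
      by_cases hfind : PySem.Chars.find (value.drop pos) token = -1
      · simp only [hfind, if_pos]
        have hninf : ¬ token <:+: value.drop pos := (PySem.Chars.find_eq_neg_one_iff _ _).mp hfind
        have hall : ∀ i, pos ≤ i → okAt value token depths i = false := by
          intro i hi
          by_contra hne
          have htrue := Bool.not_eq_false _ |>.mp hne
          simp only [okAt, Bool.and_eq_true] at htrue
          have hsw := htrue.2
          rw [PySem.Chars.startswith_iff] at hsw
          exact hninf (prefix_drop_infix value token pos i hi hsw)
        refine Eq.symm ?_
        calc scanFrom value token depths value.length pos
            = scanFrom value token depths value.length (pos + (value.length - pos)) :=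
              scan_skip _ _ _ _ _ _ (fun i h1 _ => hall i h1)
          _ = -1 := scan_ge _ _ _ _ _ (by omega)
      · have hfge : 0 ≤ PySem.Chars.find (value.drop pos) token := by
          have := PySem.Chars.neg_one_le_find (value.drop pos) token
          omega
        set f := PySem.Chars.find (value.drop pos) token with hfdef
        have hjrw : (pos : Int) + f = ((pos + f.toNat : Nat) : Int) := by omega
        have hspec := PySem.Chars.find_spec hfge
        have hpre : token <+: value.drop (pos + f.toNat) := by
          have h1 := hspec.1
          rw [List.drop_drop, ← hfdef] at h1
          exact h1
        have hjlt : pos + f.toNat < value.length := by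
          rcases Decidable.em (token = []) with ht | ht
          · have : f = 0 := by rw [hfdef, ht, PySem.Chars.find_nil]
            omega
          · have h1 := hpre.length_le
            have h2 : 0 < token.length := List.length_pos_iff.mpr ht
            simp at h1; omega
        have hfail : ∀ i, pos ≤ i → i < pos + f.toNat → okAt value token depths i = false := by
          intro i h1 h2
          by_contra hne
          have htrue := Bool.not_eq_false _ |>.mp hne
          simp only [okAt, Bool.and_eq_true] at htrue
          have hsw := htrue.2
          rw [PySem.Chars.startswith_iff] at hsw
          have hsw2 : token <+: (value.drop pos).drop (i - pos) := by
            rw [List.drop_drop, show pos + (i - pos) = i by omega]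
            exact hsw
          refine hspec.2 (i - pos) ?_ hsw2
          rw [← hfdef]; omega
        have hskip := scan_skip value token depths value.length f.toNat pos hfail
        have hjval : (if f = -1 then (-1 : Int) else (pos : Int) + f) = ((pos + f.toNat : Nat) : Int) := by
          rw [if_neg hfind]; omega
        simp only [hjval, PySem.List.pyGet?_natCast]
        rw [if_neg (show ¬ ((pos + f.toNat : Nat) : Int) = -1 by omega)]
        by_cases hcond : depths[pos + f.toNat]? = some (0:Int) ∧
            value[pos + f.toNat]? ≠ some '{' ∧ value[pos + f.toNat]? ≠ some '}'
        · rw [if_pos hcond, hskip, scanFrom]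
          have hok : okAt value token depths (pos + f.toNat) = true := by
            simp [okAt, hcond.1, hcond.2.1, hcond.2.2, PySem.Chars.startswith_iff, hpre]
          simp [hjlt, hok]
        · rw [if_neg hcond]
          have hok : okAt value token depths (pos + f.toNat) = false := by
            by_contra hne
            have htrue := Bool.not_eq_false _ |>.mp hne
            simp only [okAt, Bool.and_eq_true, decide_eq_true_eq] at htrue
            exact hcond ⟨htrue.1.1.1, htrue.1.1.2, htrue.1.2⟩
          rw [hskip, scanFrom]
          simp only [Int.toNat_natCast, hjlt, dif_pos, hok, Bool.false_eq_true, if_false]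
          exact ih (pos + f.toNat + 1) (by omega)
    · rw [goB, scan_ge _ _ _ _ _ (by omega)]
      simp [hlt]

-- ===== VERDICT (by name: the statement is the Claim_ definition above) =====
theorem find_top_level_token_py_spec : Claim_equal_find_top_level_token_py := by
  intro value token _
  unfold Spec_find_top_level_token_py find_top_level_token_py find_top_level_token_py_alt
  rw [lemA value.toList token.toList (depthsOf value.toList 0) value.toList 0 0 rfl rfl,
    lemB value.toList token.toList (depthsOf value.toList 0) value.toList.length 0 (by omega)]
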